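-- pv_equiv track=rewrite | github.com/khollbach/euler | 42/euler.py | is_triangle_word
-- ===== SOURCE A (Python) =====
-- def t(n):
--     '''(int) -> int
--     '''
--     assert n > 0
--     return n * (n+1) // 2
--
-- def is_triangle_word(word):
--     '''(str) -> bool
--     '''
--     charsum = 0
--     for c in word:
--         charsum += ord(c) - ord('A') + 1
--
--     i = 1
--     while True:
--         if t(i) == charsum:
--             return True
--         elif t(i) > charsum:
--             return False
--         i += 1
--
--     return False
-- ===== SOURCE B (Python) =====
-- def is_triangle_word(word):
--     s = sum(ord(c) - ord('A') + 1 for c in word)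
--     lo, hi = 1, s
--     while lo <= hi:
--         mid = (lo + hi) // 2
--         tm = mid * (mid + 1) // 2
--         if tm == s:
--             return True
--         if tm < s:
--             lo = mid + 1
--         else:
--             hi = mid - 1
--     return False
-- ===== Notes on version B (the rewrite author's own statement) =====
-- stated objective: alternative
-- what changed: Replaces A's linear scan over triangle numbers t(1), t(2), ... with a binary search on the index n in [1, sum] for n*(n+1)//2 == sum; the letter-sum pass dominates, so the overall cost is similar.
import Mathlib
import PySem

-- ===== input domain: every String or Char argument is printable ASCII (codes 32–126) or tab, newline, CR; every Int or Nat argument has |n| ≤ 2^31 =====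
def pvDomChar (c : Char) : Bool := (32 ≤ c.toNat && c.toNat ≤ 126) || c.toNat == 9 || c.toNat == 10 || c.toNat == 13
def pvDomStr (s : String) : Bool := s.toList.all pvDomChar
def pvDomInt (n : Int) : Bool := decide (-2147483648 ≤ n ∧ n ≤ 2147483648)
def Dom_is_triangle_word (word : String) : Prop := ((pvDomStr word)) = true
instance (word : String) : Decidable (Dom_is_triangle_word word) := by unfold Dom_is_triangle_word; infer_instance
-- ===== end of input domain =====

-- B replaces A's linear scan over triangle numbers t(1), t(2), ... by a binary search
-- on the triangle index n in [1, sum] (objective: alternative algorithm, same exact result).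

-- ===== PORT A =====
-- t(n) = n*(n+1)//2 (the assert n > 0 always holds at A's call sites, i starts at 1)
def pyT (n : Int) : Int := PySem.Int.floordiv (n * (n + 1)) 2

-- t n ≥ n for n ≥ 1 (needed by the port's termination proof, cited in decreasing_by)
theorem pyT_ge_self (n : Int) (h : 1 ≤ n) : n ≤ pyT n := by
  have h21 : (1 : Int) + 1 ≤ n + 1 := add_le_add h le_rfl
  rw [one_add_one_eq_two] at h21
  exact (PySem.Int.le_floordiv_iff_mul_le zero_lt_two).mpr
    (mul_le_mul_of_nonneg_left h21 (le_trans zero_le_one h))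

-- the loop's termination measure decreases (cited by name in decreasing_by)
theorem aLoop_dec (charsum i : Int) (hi : 1 ≤ i) (h2 : ¬pyT i > charsum) :
    (charsum + 1 - (i + 1)).toNat < (charsum + 1 - i).toNat :=
  (Int.toNat_lt_toNat
      (sub_pos.mpr (lt_of_le_of_lt (le_trans (pyT_ge_self i hi) (not_lt.mp h2)) (lt_add_one charsum)))).mpr
    (sub_lt_sub_left (lt_add_one i) (charsum + 1))

theorem aLoop_succ_pos (i : Int) (hi : 1 ≤ i) : 1 ≤ i + 1 :=
  le_trans hi (le_of_lt (lt_add_one i))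

-- the 'while True' loop of A: returns at the first i with t(i) ≥ charsum
def aLoop (charsum i : Int) (hi : 1 ≤ i) : Bool :=
  if pyT i = charsum then true
  else if pyT i > charsum then false
  else aLoop charsum (i + 1) (aLoop_succ_pos i hi)
termination_by (charsum + 1 - i).toNat
decreasing_by exact aLoop_dec charsum i hi (by assumption)

def is_triangle_word (word : String) : Bool :=
  let charsum := word.toList.foldl (fun acc c => acc + ((c.toNat : Int) - 65 + 1)) 0
  aLoop charsum 1 (le_refl 1)

-- ===== PORT B =====
-- binary search on n in [lo, hi] for n*(n+1)//2 = s
-- mid = (lo+hi)//2 and tm = mid*(mid+1)//2, the loop's local variables, as helpers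
def bMid (lo hi : Int) : Int := PySem.Int.floordiv (lo + hi) 2
def bTm (lo hi : Int) : Int := PySem.Int.floordiv (bMid lo hi * (bMid lo hi + 1)) 2
-- the two termination-measure lemmas for the binary search (cited by name in decreasing_by)
theorem bLoop_dec_lo (lo hi : Int) (hle : lo ≤ hi) :
    (hi + 1 - (bMid lo hi + 1)).toNat < (hi + 1 - lo).toNat :=
  (Int.toNat_lt_toNat (sub_pos.mpr (lt_of_le_of_lt hle (lt_add_one hi)))).mpr
    (sub_lt_sub_left (lt_of_le_of_lt (PySem.Int.floordiv_two_mid_bounds hle).1 (lt_add_one _)) (hi + 1))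

theorem bLoop_dec_hi (lo hi : Int) (hle : lo ≤ hi) :
    (bMid lo hi - 1 + 1 - lo).toNat < (hi + 1 - lo).toNat := by
  refine (Int.toNat_lt_toNat (sub_pos.mpr (lt_of_le_of_lt hle (lt_add_one hi)))).mpr ?_
  rw [sub_add_cancel]
  exact sub_lt_sub_right (lt_of_le_of_lt (PySem.Int.floordiv_two_mid_bounds hle).2 (lt_add_one hi)) lo

def bLoop (s lo hi : Int) : Bool :=
  if lo ≤ hi then
    if bTm lo hi = s then true
    else if bTm lo hi < s then bLoop s (bMid lo hi + 1) hi
    else bLoop s lo (bMid lo hi - 1)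
  else false
termination_by (hi + 1 - lo).toNat
decreasing_by
  · exact bLoop_dec_lo lo hi (by assumption)
  · exact bLoop_dec_hi lo hi (by assumption)

def is_triangle_word_alt (word : String) : Bool :=
  let s := (word.toList.map (fun c => (c.toNat : Int) - 65 + 1)).sum
  bLoop s 1 s

-- ===== PRECONDITION & SPEC =====
def Spec_is_triangle_word (word : String) (out : Bool) : Prop := out = is_triangle_word_alt word
instance (word : String) (out : Bool) : Decidable (Spec_is_triangle_word word out) := by unfold Spec_is_triangle_word; infer_instance

-- ===== CLAIM (what is proved, stated in full; the proofs are below) =====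
def Claim_equal_is_triangle_word : Prop := ∀ (word : String), Dom_is_triangle_word word → Spec_is_triangle_word word (is_triangle_word word)

-- ===== LEMMAS AND PROOFS =====

theorem pyT_two_mul (n : Int) : 2 * pyT n = n * (n + 1) := by
  obtain ⟨k, hk⟩ := Int.even_mul_succ_self n
  have : pyT n = k := by
    simp only [pyT, hk, PySem.Int.floordiv_eq_ediv_of_pos (by omega : (0:Int) < 2)]
    omega
  omega

theorem pyT_mono (a b : Int) (ha : 1 ≤ a) (hab : a ≤ b) : pyT a ≤ pyT b := by
  have h1 := pyT_two_mul a
  have h2 := pyT_two_mul b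
  nlinarith

theorem pyT_strict_mono (a b : Int) (ha : 1 ≤ a) (hab : a < b) : pyT a < pyT b := by
  have h1 := pyT_two_mul a
  have h2 := pyT_two_mul b
  nlinarith

theorem aLoop_iff (charsum i : Int) (hi : 1 ≤ i) :
    aLoop charsum i hi = true ↔ ∃ n, i ≤ n ∧ pyT n = charsum := by
  induction i, hi using aLoop.induct charsum with
  | case1 i hi heq =>
    rw [aLoop, if_pos heq]
    exact ⟨fun _ => ⟨i, le_refl _, heq⟩, fun _ => rfl⟩
  | case2 i hi heq hgt =>
    rw [aLoop, if_neg heq, if_pos hgt]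
    simp only [Bool.false_eq_true, false_iff]
    rintro ⟨n, hn, hns⟩
    rcases eq_or_lt_of_le hn with h | h
    · exact heq (h ▸ hns)
    · have := pyT_strict_mono i n hi h
      omega
  | case3 i hi heq hgt ih =>
    rw [aLoop, if_neg heq, if_neg hgt, ih]
    constructor
    · rintro ⟨n, hn, hns⟩; exact ⟨n, by omega, hns⟩
    · rintro ⟨n, hn, hns⟩
      refine ⟨n, ?_, hns⟩
      rcases eq_or_lt_of_le hn with h | h
      · exact absurd (h ▸ hns) heq
      · omega

theorem bLoop_iff (s lo hi : Int) :
    1 ≤ lo → (∀ n, 1 ≤ n → pyT n = s → lo ≤ n ∧ n ≤ hi) →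
    (bLoop s lo hi = true ↔ ∃ n, 1 ≤ n ∧ pyT n = s) := by
  induction lo, hi using bLoop.induct s with
  | case1 lo hi hle heq =>
    intro hlo _
    rw [bLoop, if_pos hle, if_pos heq]
    have hb := PySem.Int.floordiv_two_mid_bounds hle
    exact ⟨fun _ => ⟨bMid lo hi, by have hb2 : lo ≤ bMid lo hi ∧ bMid lo hi ≤ hi := hb; omega, heq⟩, fun _ => rfl⟩
  | case2 lo hi hle heq hlt ih =>
    intro hlo hinv
    have hb := PySem.Int.floordiv_two_mid_bounds hle
    replace hb : lo ≤ bMid lo hi ∧ bMid lo hi ≤ hi := hb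
    rw [bLoop, if_pos hle, if_neg heq, if_pos hlt]
    refine ih (by omega) ?_
    intro n hn hns
    refine ⟨?_, (hinv n hn hns).2⟩
    by_contra hc
    have hm : pyT n ≤ pyT (bMid lo hi) := pyT_mono n (bMid lo hi) hn (by omega)
    have : pyT (bMid lo hi) = bTm lo hi := rfl
    omega
  | case3 lo hi hle heq hlt ih =>
    intro hlo hinv
    have hb := PySem.Int.floordiv_two_mid_bounds hle
    replace hb : lo ≤ bMid lo hi ∧ bMid lo hi ≤ hi := hb
    rw [bLoop, if_pos hle, if_neg heq, if_neg hlt]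
    refine ih hlo ?_
    intro n hn hns
    refine ⟨(hinv n hn hns).1, ?_⟩
    by_contra hc
    have hm : pyT (bMid lo hi) ≤ pyT n := pyT_mono (bMid lo hi) n (by omega) (by omega)
    have : pyT (bMid lo hi) = bTm lo hi := rfl
    omega
  | case4 lo hi hle =>
    intro hlo hinv
    rw [bLoop, if_neg hle]
    simp only [Bool.false_eq_true, false_iff]
    rintro ⟨n, hn, hns⟩
    have := hinv n hn hns
    omega

theorem foldl_eq_map_sum (l : List Char) (a : Int) :
    l.foldl (fun acc c => acc + ((c.toNat : Int) - 65 + 1)) a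
      = a + (l.map (fun c => (c.toNat : Int) - 65 + 1)).sum := by
  induction l generalizing a with
  | nil => simp
  | cons c l ih => simp [ih]; ring

-- ===== VERDICT (by name: the statement is the Claim_ definition above) =====
theorem is_triangle_word_spec : Claim_equal_is_triangle_word := by
  intro word _
  unfold Spec_is_triangle_word is_triangle_word is_triangle_word_alt
  rw [foldl_eq_map_sum, zero_add]
  set s := (word.toList.map (fun c => (c.toNat : Int) - 65 + 1)).sum with hs
  have hA := aLoop_iff s 1 (by omega)
  have hB := bLoop_iff s 1 s (by omega) ?_
  · rw [Bool.eq_iff_iff, hA, hB]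
  · intro n hn hns
    have := pyT_ge_self n hn
    exact ⟨hn, by omega⟩
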